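-- pv_equiv track=rewrite | github.com/gavt45/spc_2017_searcher | npk35/backend/InvertIndexIdf.py | index_one_file
-- ===== SOURCE A (Python) =====
-- def index_one_file(words):
--     fileIndex = {}
--     for index, word in enumerate(words):
--         if word in fileIndex.keys():
--             fileIndex[word].append(index)
--         else:
--             fileIndex[word] = [index]
--     return fileIndex
-- ===== SOURCE B (Python) =====
-- def index_one_file(words):
--     # Idiomatic rewrite: distinct words first (first-occurrence order), then one
--     # enumerate-scan per distinct word to collect its positions.
--     return {w: [i for i, x in enumerate(words) if x == w]
--             for w in dict.fromkeys(words)}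
-- ===== Notes on version B (the rewrite author's own statement) =====
-- stated objective: alternative
-- what changed: Replaces A's single accumulation pass with a dict-append per element by a dict comprehension: compute the distinct words first, then for each distinct word scan enumerate(words) once to collect its indices.
import Mathlib
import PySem

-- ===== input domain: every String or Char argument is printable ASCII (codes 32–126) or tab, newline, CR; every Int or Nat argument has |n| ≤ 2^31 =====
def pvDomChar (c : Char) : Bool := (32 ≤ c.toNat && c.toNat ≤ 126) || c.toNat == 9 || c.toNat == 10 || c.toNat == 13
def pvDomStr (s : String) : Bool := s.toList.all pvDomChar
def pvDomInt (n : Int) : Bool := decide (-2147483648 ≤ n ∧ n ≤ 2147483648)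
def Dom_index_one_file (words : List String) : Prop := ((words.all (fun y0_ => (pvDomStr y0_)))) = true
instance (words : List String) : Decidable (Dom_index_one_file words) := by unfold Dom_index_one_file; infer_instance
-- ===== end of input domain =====

-- B rebuilds the index as a dict comprehension: distinct words first, then one scan of enumerate(words) per distinct word (alternative decomposition, not faster).


-- ===== PORT A =====
-- A: one pass over enumerate(words); append index to existing entry, else new [index]
def index_one_file (words : List String) : List (String × List Int) :=
  ((PySem.List.enumerate words 0).foldl
    (fun (d : PySem.Dict String (List Int)) (p : Int × String) =>
      if d.contains p.2 then d.insert p.2 (d.getD p.2 [] ++ [p.1])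
      else d.insert p.2 [p.1])
    PySem.Dict.empty).items

-- ===== PORT B =====
-- B: distinct words first (dict.fromkeys order), then per-word index collection
def index_one_file_alt (words : List String) : List (String × List Int) :=
  (PySem.List.dedup words).map
    (fun w => (w, ((PySem.List.enumerate words 0).filter (fun p => p.2 == w)).map (·.1)))

-- ===== PRECONDITION & SPEC =====
def Spec_index_one_file (words : List String) (out : List (String × List Int)) : Prop := out = index_one_file_alt words
instance (words : List String) (out : List (String × List Int)) : Decidable (Spec_index_one_file words out) := by unfold Spec_index_one_file; infer_instance

-- ===== CLAIM (what is proved, stated in full; the proofs are below) =====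
def Claim_equal_index_one_file : Prop := ∀ (words : List String), Dom_index_one_file words → Spec_index_one_file words (index_one_file words)

-- ===== LEMMAS AND PROOFS =====

-- A's loop step is exactly Dict.modify with default []
lemma step_eq_modify :
    (fun (d : PySem.Dict String (List Int)) (p : Int × String) =>
      if d.contains p.2 then d.insert p.2 (d.getD p.2 [] ++ [p.1])
      else d.insert p.2 [p.1])
    = (fun d p => d.modify p.2 [] (· ++ [p.1])) := by
  funext d p
  by_cases h : d.contains p.2
  · simp [h, PySem.Dict.modify]
  · rw [if_neg h]
    simp only [PySem.Dict.modify,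
      PySem.Dict.getD_of_not_contains d [] (Bool.not_eq_true _ ▸ h), List.nil_append]

-- ===== VERDICT (by name: the statement is the Claim_ definition above) =====
theorem index_one_file_spec : Claim_equal_index_one_file := by
  intro words _
  unfold Spec_index_one_file index_one_file index_one_file_alt
  rw [step_eq_modify]
  have hfold : (PySem.List.enumerate words 0).foldl
      (fun (d : PySem.Dict String (List Int)) p => d.modify p.2 [] (· ++ [p.1])) PySem.Dict.empty
      = ((PySem.List.enumerate words 0).map Prod.swap).foldl
        (fun d p => d.modify p.1 [] (· ++ [p.2])) PySem.Dict.empty := by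
    rw [List.foldl_map]
    simp [Prod.swap]
  rw [hfold]
  have hmapfst : ((PySem.List.enumerate words 0).map Prod.swap).map Prod.fst = words := by
    rw [List.map_map]
    have h2 := PySem.List.map_snd_enumerate words 0
    simp only [Function.comp_def, Prod.swap]
    exact h2
  have hnd : (((PySem.List.enumerate words 0).map Prod.swap).foldl
      (fun (d : PySem.Dict String (List Int)) p => d.modify p.1 [] (· ++ [p.2])) PySem.Dict.empty).keys.Nodup :=
    PySem.Dict.nodup_keys_foldl_modify_key _ Prod.fst [] _ _ PySem.Dict.nodup_keys_empty
  have hkeys : (((PySem.List.enumerate words 0).map Prod.swap).foldl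
      (fun (d : PySem.Dict String (List Int)) p => d.modify p.1 [] (· ++ [p.2])) PySem.Dict.empty).keys
      = PySem.List.dedup words := by
    rw [PySem.Dict.keys_foldl_modify_key, hmapfst]
    simp [PySem.Dict.keys_empty, PySem.Set.update_nil_left]
  rw [PySem.Dict.items_eq_map_keys _ hnd [], hkeys]
  apply List.map_congr_left
  intro w _
  have hg := PySem.Dict.getD_foldl_modify_append
    ((PySem.List.enumerate words 0).map Prod.swap) PySem.Dict.empty w
  rw [hg]
  simp only [PySem.Dict.getD_empty, List.nil_append, List.filter_map, List.map_map]
  simp [Function.comp_def, Prod.swap]
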